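-- pv_equiv track=rewrite | github.com/tamnd/python-one | scripts/make-docs/preprocess.py | fix_verb
-- ===== SOURCE A (Python) =====
-- def fix_verb(text: str) -> str:
--     r"""
--     Convert old-style \verb\text\ (backslash delimiters) to \verb|text|.
--     Also handles other single-char delimiters that pandoc may not like.
--     Pandoc handles \verb|text| and \verb+text+ natively.
--     """
--     result = []
--     i = 0
--     while i < len(text):
--         if text[i:i+5] == r'\verb' and i + 5 < len(text) and text[i + 5] != '{':
--             delim = text[i + 5]
--             i += 6
--             end = text.find(delim, i)
--             if end == -1:
--                 result.append(r'\verb')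
--                 result.append(delim)
--                 continue
--             inner = text[i:end]
--             # Replace any | inside with a space to avoid pandoc confusion
--             safe_inner = inner.replace('|', ' ')
--             result.append(r'\verb|' + safe_inner + r'|')
--             i = end + 1
--         else:
--             result.append(text[i])
--             i += 1
--     return ''.join(result)
-- ===== SOURCE B (Python) =====
-- def fix_verb(text: str) -> str:
--     r"""
--     Convert old-style \verb\text\ (backslash delimiters) to \verb|text|.
--     Scans by jumping between \verb occurrences with str.find and copying
--     the gaps as bulk slices, instead of walking one character at a time.
--     """
--     out = []
--     i = 0
--     n = len(text)
--     while i < n: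
--         j = text.find(r'\verb', i)
--         if j == -1:
--             out.append(text[i:])
--             break
--         out.append(text[i:j])
--         if j + 5 < n and text[j + 5] != '{':
--             delim = text[j + 5]
--             end = text.find(delim, j + 6)
--             if end == -1:
--                 out.append(r'\verb' + delim)
--                 i = j + 6
--             else:
--                 out.append(r'\verb|' + text[j + 6:end].replace('|', ' ') + r'|')
--                 i = end + 1
--         else:
--             out.append(text[j])
--             i = j + 1
--     return ''.join(out)
-- ===== Notes on version B (the rewrite author's own statement) =====
-- stated objective: faster
-- what changed: B jumps between \verb occurrences with str.find and copies the intervening text as bulk slices, instead of A's character-by-character scan that compares text[i:i+5] at every position.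
import Mathlib
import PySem

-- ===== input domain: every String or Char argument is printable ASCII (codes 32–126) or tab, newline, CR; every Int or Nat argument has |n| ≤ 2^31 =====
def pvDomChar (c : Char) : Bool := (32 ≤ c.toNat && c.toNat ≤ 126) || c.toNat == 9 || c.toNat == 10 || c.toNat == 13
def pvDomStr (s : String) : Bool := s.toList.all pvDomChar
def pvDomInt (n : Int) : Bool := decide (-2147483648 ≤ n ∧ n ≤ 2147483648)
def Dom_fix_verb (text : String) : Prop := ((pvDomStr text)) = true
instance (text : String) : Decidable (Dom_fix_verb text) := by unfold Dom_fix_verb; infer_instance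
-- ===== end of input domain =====

-- B rewrites A's character-by-character scan as a str.find-driven loop over \verb occurrences
-- that copies the intervening text as bulk slices (objective: faster, constant factor).

-- ===== PORT A =====
-- the literal r'\verb'
def pvVerb : List Char := ['\\', 'v', 'e', 'r', 'b']

-- A's while loop: i walks one position at a time, comparing text[i:i+5] at each step.
def fixVerbA (cs : List Char) (i : Nat) : List Char :=
  if h : i < cs.length then
    if hc : PySem.Chars.slice cs (some (i : Int)) (some ((i : Int) + 5)) = pvVerb
            ∧ i + 5 < cs.length ∧ cs.getD (i + 5) ' ' ≠ '{' then
      -- delim = text[i+5]; i += 6; end = text.find(delim, i)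
      if he : PySem.Chars.findFrom cs [cs.getD (i + 5) ' '] ((i + 6 : Nat) : Int) none = -1 then
        pvVerb ++ [cs.getD (i + 5) ' '] ++ fixVerbA cs (i + 6)
      else
        pvVerb ++ '|' ::
          PySem.Chars.replace
            (PySem.Chars.slice cs (some ((i + 6 : Nat) : Int))
              (some (PySem.Chars.findFrom cs [cs.getD (i + 5) ' '] ((i + 6 : Nat) : Int) none)))
            ['|'] [' ']
          ++ ['|']
          ++ fixVerbA cs ((PySem.Chars.findFrom cs [cs.getD (i + 5) ' '] ((i + 6 : Nat) : Int) none).toNat + 1)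
    else
      cs.getD i ' ' :: fixVerbA cs (i + 1)
  else []
termination_by cs.length - i
decreasing_by
  · omega
  · have hk : i + 6 ≤ cs.length := by omega
    have := (PySem.Chars.findFrom_natCast_spec cs [cs.getD (i + 5) ' '] (i + 6) hk he).1
    omega
  · omega

def fix_verb (text : String) : String := String.ofList (fixVerbA text.toList 0)

-- ===== PORT B =====
-- B's while loop: j = text.find('\verb', i); copy text[i:j] in bulk, handle the occurrence, repeat.
def fixVerbB (cs : List Char) (i : Nat) : List Char :=
  if h : i < cs.length then
    if hj : PySem.Chars.findFrom cs pvVerb (i : Nat) none = -1 then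
      PySem.Chars.slice cs (some (i : Int)) none
    else
      PySem.Chars.slice cs (some (i : Int)) (some (PySem.Chars.findFrom cs pvVerb (i : Nat) none)) ++
      (if hg : (PySem.Chars.findFrom cs pvVerb (i : Nat) none).toNat + 5 < cs.length
               ∧ cs.getD ((PySem.Chars.findFrom cs pvVerb (i : Nat) none).toNat + 5) ' ' ≠ '{' then
         if he : PySem.Chars.findFrom cs [cs.getD ((PySem.Chars.findFrom cs pvVerb (i : Nat) none).toNat + 5) ' ']
                   (((PySem.Chars.findFrom cs pvVerb (i : Nat) none).toNat + 6 : Nat) : Int) none = -1 then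
           pvVerb ++ [cs.getD ((PySem.Chars.findFrom cs pvVerb (i : Nat) none).toNat + 5) ' ']
             ++ fixVerbB cs ((PySem.Chars.findFrom cs pvVerb (i : Nat) none).toNat + 6)
         else
           pvVerb ++ '|' ::
             PySem.Chars.replace
               (PySem.Chars.slice cs (some (((PySem.Chars.findFrom cs pvVerb (i : Nat) none).toNat + 6 : Nat) : Int))
                 (some (PySem.Chars.findFrom cs [cs.getD ((PySem.Chars.findFrom cs pvVerb (i : Nat) none).toNat + 5) ' ']
                   (((PySem.Chars.findFrom cs pvVerb (i : Nat) none).toNat + 6 : Nat) : Int) none)))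
               ['|'] [' ']
             ++ ['|']
             ++ fixVerbB cs ((PySem.Chars.findFrom cs [cs.getD ((PySem.Chars.findFrom cs pvVerb (i : Nat) none).toNat + 5) ' ']
                   (((PySem.Chars.findFrom cs pvVerb (i : Nat) none).toNat + 6 : Nat) : Int) none).toNat + 1)
       else
         cs.getD ((PySem.Chars.findFrom cs pvVerb (i : Nat) none).toNat) ' '
           :: fixVerbB cs ((PySem.Chars.findFrom cs pvVerb (i : Nat) none).toNat + 1))
  else []
termination_by cs.length - i
decreasing_by
  · have hk : i <= cs.length := by omega
    have hji := (PySem.Chars.findFrom_natCast_spec cs pvVerb i hk hj).1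
    omega
  · have hk : i <= cs.length := by omega
    have hji := (PySem.Chars.findFrom_natCast_spec cs pvVerb i hk hj).1
    have hk6 : (PySem.Chars.findFrom cs pvVerb (i : Nat) none).toNat + 6 <= cs.length := by omega
    have := (PySem.Chars.findFrom_natCast_spec cs
      [cs.getD ((PySem.Chars.findFrom cs pvVerb (i : Nat) none).toNat + 5) ' ']
      ((PySem.Chars.findFrom cs pvVerb (i : Nat) none).toNat + 6) hk6 he).1
    omega
  · have hk : i <= cs.length := by omega
    have hji := (PySem.Chars.findFrom_natCast_spec cs pvVerb i hk hj).1
    omega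

def fix_verb_alt (text : String) : String := String.ofList (fixVerbB text.toList 0)

-- ===== PRECONDITION & SPEC =====
def Spec_fix_verb (text : String) (out : String) : Prop := out = fix_verb_alt text
instance (text : String) (out : String) : Decidable (Spec_fix_verb text out) := by unfold Spec_fix_verb; infer_instance

-- ===== CLAIM (what is proved, stated in full; the proofs are below) =====
def Claim_equal_fix_verb : Prop := ∀ (text : String), Dom_fix_verb text → Spec_fix_verb text (fix_verb text)

-- ===== LEMMAS AND PROOFS =====

-- an infix of a later suffix is an infix of an earlier suffix
theorem pv_infix_mono (cs sub : List Char) (k m : Nat) (hkm : k ≤ m)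
    (h : sub <:+: cs.drop m) : sub <:+: cs.drop k := by
  have hd : (cs.drop k).drop (m - k) = cs.drop m := by
    rw [List.drop_drop]; congr 1; omega
  have h' : sub <:+: (cs.drop k).drop (m - k) := by rw [hd]; exact h
  exact h'.trans (List.drop_suffix _ _).isInfix

-- A's 5-char slice test at i holds iff '\verb' is a prefix of the suffix at i
theorem pv_slice5_iff (cs : List Char) (i : Nat) :
    PySem.Chars.slice cs (some (i : Int)) (some ((i : Int) + 5)) = pvVerb ↔ pvVerb <+: cs.drop i := by
  have h5 : ((i : Int) + 5) = ((i + 5 : Nat) : Int) := by push_cast; ring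
  rw [h5, PySem.Chars.slice_eq_listSlice, PySem.List.slice_natCast]
  have hn : i + 5 - i = 5 := by omega
  rw [hn]
  constructor
  · intro h; rw [← h]; exact List.take_prefix _ _
  · intro h
    have := List.prefix_iff_eq_take.mp h
    simpa [pvVerb] using this.symm

-- a successful find is unchanged when the start moves forward but not past the hit
theorem pv_findFrom_stable (cs sub : List Char) (k k' : Nat) (hkk : k ≤ k') (hlen : k' ≤ cs.length)
    (hne : PySem.Chars.findFrom cs sub ((k : Nat) : Int) none ≠ -1)
    (hle : ((k' : Nat) : Int) ≤ PySem.Chars.findFrom cs sub ((k : Nat) : Int) none) :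
    PySem.Chars.findFrom cs sub ((k' : Nat) : Int) none = PySem.Chars.findFrom cs sub ((k : Nat) : Int) none := by
  have hk : k ≤ cs.length := le_trans hkk hlen
  obtain ⟨h1, h2, h3⟩ := PySem.Chars.findFrom_natCast_spec cs sub k hk hne
  set r := PySem.Chars.findFrom cs sub ((k : Nat) : Int) none with hr
  have hrn : (r.toNat : Int) = r := Int.toNat_of_nonneg (by omega)
  have hinf : sub <:+: cs.drop k' := pv_infix_mono cs sub k' r.toNat (by omega) h2.isInfix
  have hne' : PySem.Chars.findFrom cs sub ((k' : Nat) : Int) none ≠ -1 := by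
    intro hcon
    exact (PySem.Chars.findFrom_natCast_eq_neg_one_iff cs sub k' hlen).mp hcon hinf
  obtain ⟨g1, g2, g3⟩ := PySem.Chars.findFrom_natCast_spec cs sub k' hlen hne'
  set r' := PySem.Chars.findFrom cs sub ((k' : Nat) : Int) none with hr'
  have hrn' : (r'.toNat : Int) = r' := Int.toNat_of_nonneg (by omega)
  have heq : r'.toNat = r.toNat := by
    by_contra hneq
    rcases Nat.lt_or_ge r'.toNat r.toNat with hlt | hge
    · exact h3 r'.toNat (by omega) hlt g2
    · exact g3 r.toNat (by omega) (by omega) h2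
  omega

-- on a suffix with no occurrence of '\verb', A's loop copies the suffix verbatim
theorem fixVerbA_no_verb (cs : List Char) (n : Nat) :
    ∀ i, cs.length - i ≤ n → ¬ pvVerb <:+: cs.drop i → fixVerbA cs i = cs.drop i := by
  induction n with
  | zero =>
    intro i hn _
    rw [fixVerbA, dif_neg (by omega)]
    exact (List.drop_eq_nil_of_le (by omega)).symm
  | succ n IH =>
    intro i hn hnv
    by_cases hi : i < cs.length
    · have hc1 : ¬ (PySem.Chars.slice cs (some (i : Int)) (some ((i : Int) + 5)) = pvVerb) := by
        rw [pv_slice5_iff]; exact fun hp => hnv hp.isInfix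
      rw [fixVerbA, dif_pos hi, dif_neg (fun hcc => hc1 hcc.1)]
      have hnv' : ¬ pvVerb <:+: cs.drop (i + 1) :=
        fun h => hnv (pv_infix_mono cs pvVerb i (i + 1) (by omega) h)
      rw [IH (i + 1) (by omega) hnv']
      rw [List.drop_eq_getElem_cons hi, List.getD_eq_getElem cs ' ' hi]
    · rw [fixVerbA, dif_neg hi]
      exact (List.drop_eq_nil_of_le (by omega)).symm

-- main equivalence of the two loops, by strong induction on the remaining length
theorem fixVerbA_eq_aux (cs : List Char) (n : Nat) :
    ∀ i, cs.length - i ≤ n → fixVerbA cs i = fixVerbB cs i := by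
  induction n with
  | zero =>
    intro i hn
    rw [fixVerbA, fixVerbB, dif_neg (by omega), dif_neg (by omega)]
  | succ n IH =>
    intro i hn
    by_cases hi : i < cs.length
    · by_cases hj : PySem.Chars.findFrom cs pvVerb ((i : Nat) : Int) none = -1
      · have hnv : ¬ pvVerb <:+: cs.drop i :=
          (PySem.Chars.findFrom_natCast_eq_neg_one_iff cs pvVerb i hi.le).mp hj
        rw [fixVerbB, dif_pos hi, dif_pos hj,
          PySem.Chars.slice_eq_listSlice, PySem.List.slice_from_natCast]
        exact fixVerbA_no_verb cs (n + 1) i hn hnv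
      · obtain ⟨h1, h2, h3⟩ := PySem.Chars.findFrom_natCast_spec cs pvVerb i hi.le hj
        set j := PySem.Chars.findFrom cs pvVerb ((i : Nat) : Int) none with hjdef
        have hj0 : (j.toNat : Int) = j := Int.toNat_of_nonneg (by omega)
        have hjlen : j.toNat + 5 ≤ cs.length := by
          have hl := h2.length_le
          rw [List.length_drop] at hl
          simp only [pvVerb, List.length_cons, List.length_nil] at hl
          omega
        by_cases hij : i = j.toNat
        · -- the find hit is at the current position: both take the same branch
          rw [fixVerbA, dif_pos hi]
          conv_rhs => rw [fixVerbB]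
          rw [dif_pos hi, dif_neg hj, ← hjdef]
          have hjtn : j.toNat = i := hij.symm
          rw [hjtn]
          have hjeq : j = ((i : Nat) : Int) := by omega
          rw [hjeq]
          have hsl0 : PySem.Chars.slice cs (some ((i : Nat) : Int)) (some ((i : Nat) : Int)) = [] := by
            rw [PySem.Chars.slice_eq_listSlice, PySem.List.slice_natCast]
            simp
          have hc1 : PySem.Chars.slice cs (some (i : Int)) (some ((i : Int) + 5)) = pvVerb :=
            (pv_slice5_iff cs i).mpr (by rw [← hjtn] at hij ⊢; exact hij ▸ h2)
          by_cases hg : i + 5 < cs.length ∧ cs.getD (i + 5) ' ' ≠ '{'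
          · rw [dif_pos ⟨hc1, hg.1, hg.2⟩, dif_pos hg, hsl0, List.nil_append]
            by_cases he : PySem.Chars.findFrom cs [cs.getD (i + 5) ' '] ((i + 6 : Nat) : Int) none = -1
            · rw [dif_pos he, dif_pos he, IH (i + 6) (by omega)]
            · have hee := (PySem.Chars.findFrom_natCast_spec cs [cs.getD (i + 5) ' '] (i + 6) (by omega) he).1
              rw [dif_neg he, dif_neg he,
                IH ((PySem.Chars.findFrom cs [cs.getD (i + 5) ' '] ((i + 6 : Nat) : Int) none).toNat + 1)
                  (by omega)]
          · rw [dif_neg (fun hcc => hg ⟨hcc.2.1, hcc.2.2⟩), dif_neg hg, hsl0, List.nil_append,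
              IH (i + 1) (by omega)]
        · -- gap before the hit: A copies one character, B's find result is unchanged
          have hilt : i < j.toNat := by omega
          have hi1 : i + 1 < cs.length := by omega
          have hc1 : ¬ (PySem.Chars.slice cs (some (i : Int)) (some ((i : Int) + 5)) = pvVerb) := by
            rw [pv_slice5_iff]; exact fun hp => h3 i le_rfl hilt hp
          rw [fixVerbA, dif_pos hi, dif_neg (fun hcc => hc1 hcc.1), IH (i + 1) (by omega)]
          have hstab : PySem.Chars.findFrom cs pvVerb (((i + 1 : Nat) : Nat) : Int) none = j := by
            rw [hjdef]
            exact pv_findFrom_stable cs pvVerb i (i + 1) (by omega) (by omega) hj (by omega)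
          have hjne1 : ¬ (j = -1) := hj
          conv_lhs => rw [fixVerbB]
          conv_rhs => rw [fixVerbB]
          rw [dif_pos hi1, dif_pos hi, ← hjdef, hstab, dif_neg hjne1, dif_neg hjne1]
          have hsl2 : ∀ k : Nat, PySem.Chars.slice cs (some ((k : Nat) : Int)) (some j) =
              List.take (j.toNat - k) (List.drop k cs) := by
            intro k
            rw [← hj0, PySem.Chars.slice_eq_listSlice, PySem.List.slice_natCast]
            simp only [Int.toNat_natCast]
          rw [hsl2 (i + 1), hsl2 i]
          rw [List.drop_eq_getElem_cons hi, List.getD_eq_getElem cs ' ' hi]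
          have hnn : j.toNat - i = (j.toNat - (i + 1)) + 1 := by omega
          rw [hnn, List.take_succ_cons, List.cons_append]
    · rw [fixVerbA, fixVerbB, dif_neg hi, dif_neg hi]

theorem fixVerbA_eq_fixVerbB (cs : List Char) (i : Nat) : fixVerbA cs i = fixVerbB cs i :=
  fixVerbA_eq_aux cs (cs.length - i) i le_rfl

-- ===== VERDICT (by name: the statement is the Claim_ definition above) =====
theorem fix_verb_spec : Claim_equal_fix_verb := by
  intro text _
  unfold Spec_fix_verb fix_verb fix_verb_alt
  rw [fixVerbA_eq_fixVerbB]
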